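-- pv_equiv track=rewrite | github.com/TidalTunes/Maestro | Agent/src/maestroxml/importer.py | _choose_measure_numbers
-- ===== SOURCE A (Python) =====
-- from typing import Iterable
--
-- def _choose_measure_numbers(source_numbers: Iterable[str]) -> list[int]:
--     labels = list(source_numbers)
--     parsed_numbers: list[int] = []
--     previous = -1
--     for source_number in labels:
--         try:
--             value = int(str(source_number).strip())
--         except ValueError:
--             return list(range(1, len(labels) + 1))
--         if value <= 0 or value <= previous:
--             return list(range(1, len(labels) + 1))
--         parsed_numbers.append(value)
--         previous = value
--     return parsed_numbers
-- ===== SOURCE B (Python) =====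
-- def _choose_measure_numbers(source_numbers):
--     labels = list(source_numbers)
--     fallback = list(range(1, len(labels) + 1))
--     try:
--         parsed = [int(str(s).strip()) for s in labels]
--     except ValueError:
--         return fallback
--     if parsed == sorted(set(parsed)) and (not parsed or parsed[0] > 0):
--         return parsed
--     return fallback
-- ===== Notes on version B (the rewrite author's own statement) =====
-- stated objective: alternative
-- what changed: Replaces A's interleaved scan threading a 'previous' accumulator with a sort-based validation: parse all labels, then accept the parsed list exactly when it equals sorted(set(parsed)) and its first element is positive, else return the 1..n fallback.
import Mathlib
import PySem

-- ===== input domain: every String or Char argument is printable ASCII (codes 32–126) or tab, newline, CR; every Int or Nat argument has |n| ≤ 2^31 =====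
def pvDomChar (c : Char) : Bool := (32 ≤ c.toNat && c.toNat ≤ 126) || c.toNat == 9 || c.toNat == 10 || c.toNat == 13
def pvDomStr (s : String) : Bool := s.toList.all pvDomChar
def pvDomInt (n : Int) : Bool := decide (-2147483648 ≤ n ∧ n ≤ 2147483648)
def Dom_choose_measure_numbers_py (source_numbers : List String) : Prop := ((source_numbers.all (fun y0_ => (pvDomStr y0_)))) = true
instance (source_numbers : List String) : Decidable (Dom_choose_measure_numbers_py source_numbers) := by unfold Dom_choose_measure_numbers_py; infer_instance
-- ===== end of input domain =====

-- B replaces A's interleaved loop with a threaded `previous` accumulator by a sort-based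
-- validation: the parsed list is accepted iff it equals sorted(set(parsed)) and its head is
-- positive (an alternative characterisation of "positive and strictly increasing").

-- shared primitive: `int(str(s).strip())`, which appears verbatim in both programs
def pvParse (s : String) : Option Int := PySem.Int.ofStr? (PySem.Str.strip s)

-- ===== PORT A =====
-- A's loop: `previous` threaded through, `none` = early `return` of the fallback range
def chooseA_go : List String → Int → Option (List Int)
  | [], _ => some []
  | s :: rest, previous =>
    match pvParse s with
    | none => none
    | some value =>
      if value ≤ 0 ∨ value ≤ previous then none
      else (chooseA_go rest value).map (fun l => value :: l)

def choose_measure_numbers_py (source_numbers : List String) : List Int :=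
  match chooseA_go source_numbers (-1) with
  | some parsed_numbers => parsed_numbers
  | none => PySem.List.pyRange 1 (source_numbers.length + 1) 1

-- ===== PORT B =====
def choose_measure_numbers_py_alt (source_numbers : List String) : List Int :=
  let fallback := PySem.List.pyRange 1 (source_numbers.length + 1) 1
  match source_numbers.mapM pvParse with
  | none => fallback
  | some parsed =>
    if decide (parsed = PySem.List.sorted (PySem.Set.ofList parsed) (fun x => x) false) &&
       (parsed.isEmpty || decide (0 < parsed.headD 0)) then parsed
    else fallback

-- ===== PRECONDITION & SPEC =====
def Spec_choose_measure_numbers_py (source_numbers : List String) (out : List Int) : Prop := out = choose_measure_numbers_py_alt source_numbers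
instance (source_numbers : List String) (out : List Int) : Decidable (Spec_choose_measure_numbers_py source_numbers out) := by unfold Spec_choose_measure_numbers_py; infer_instance

-- ===== CLAIM (what is proved, stated in full; the proofs are below) =====
def Claim_equal_choose_measure_numbers_py : Prop := ∀ (source_numbers : List String), Dom_choose_measure_numbers_py source_numbers → Spec_choose_measure_numbers_py source_numbers (choose_measure_numbers_py source_numbers)

-- ===== LEMMAS AND PROOFS =====

-- proof-side helper: A's in-loop condition, accumulated over a list
def chainB (prev : Int) : List Int → Bool
  | [] => true
  | v :: t => (decide (prev < v) && decide (0 < v)) && chainB v t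

-- A's loop succeeds exactly when every label parses and the chain condition holds
theorem chooseA_go_eq (xs : List String) (prev : Int) :
    chooseA_go xs prev = (xs.mapM pvParse).bind
      (fun l => if chainB prev l then some l else none) := by
  induction xs generalizing prev with
  | nil => simp [chooseA_go, chainB]
  | cons s rest ih =>
    simp only [chooseA_go, List.mapM_cons]
    cases hp : pvParse s with
    | none => simp
    | some v =>
      simp only [Option.bind_eq_bind, Option.bind_some]
      rw [ih v]
      cases hm : rest.mapM pvParse with
      | none => simp
      | some l =>
        have hstep : chainB prev (v :: l) =
            ((decide (prev < v) && decide (0 < v)) && chainB v l) := rfl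
        by_cases hcond : v ≤ 0 ∨ v ≤ prev
        · have h1 : (decide (prev < v) && decide (0 < v)) = false := by
            rcases hcond with h | h <;> simp <;> omega
          simp [hcond, hstep, h1]
        · have h1 : (decide (prev < v) && decide (0 < v)) = true := by
            simp; omega
          by_cases hc : chainB v l = true
          · simp [hcond, hstep, h1, hc]
          · simp [hcond, hstep, h1, Bool.eq_false_iff.mpr hc]

-- with a positive start, positivity of later elements is implied by the chain
theorem chainB_pos (t : List Int) (v : Int) (hv : 0 < v) :
    chainB v t = true ↔ List.IsChain (· < ·) (v :: t) := by
  induction t generalizing v with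
  | nil => simp [chainB]
  | cons w u ih =>
    simp only [chainB, Bool.and_eq_true, decide_eq_true_eq, List.isChain_cons_cons]
    constructor
    · rintro ⟨⟨h1, h2⟩, h3⟩; exact ⟨h1, (ih w h2).mp h3⟩
    · rintro ⟨h1, h3⟩
      have hw : 0 < w := by omega
      exact ⟨⟨h1, hw⟩, (ih w hw).mpr h3⟩

-- A's full condition (chain from -1) = strict increase plus positive head
theorem chainB_neg1 (l : List Int) :
    chainB (-1) l = true ↔ l.Pairwise (· < ·) ∧ (l = [] ∨ 0 < l.headD 0) := by
  cases l with
  | nil => simp [chainB]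
  | cons v t =>
    simp only [chainB, Bool.and_eq_true, decide_eq_true_eq, List.headD_cons]
    constructor
    · rintro ⟨⟨_, hv⟩, h⟩
      exact ⟨List.isChain_iff_pairwise.mp ((chainB_pos t v hv).mp h), Or.inr hv⟩
    · rintro ⟨hp, h⟩
      have hv : 0 < v := by
        rcases h with h | h
        · cases h
        · exact h
      exact ⟨⟨by omega, hv⟩, (chainB_pos t v hv).mpr (List.isChain_iff_pairwise.mpr hp)⟩

-- a duplicate-free prefix absorbs Set.add element by element
theorem foldl_add_nodup (l s : List Int) (h : (s ++ l).Nodup) :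
    l.foldl PySem.Set.add s = s ++ l := by
  induction l generalizing s with
  | nil => simp
  | cons a t ih =>
    obtain ⟨-, -, hdisj⟩ := List.nodup_append.mp h
    have ha : a ∉ s := fun hm => hdisj a hm a (by simp) rfl
    have hadd : PySem.Set.add s a = s ++ [a] := by
      simp [PySem.Set.add, PySem.Set.contains, ha]
    simp only [List.foldl_cons, hadd]
    rw [ih (s ++ [a]) (by simpa using h)]
    simp

-- strictly increasing ⟺ equals sorted(set(·))
theorem sorted_ofList_eq_iff (l : List Int) :
    (l = PySem.List.sorted (PySem.Set.ofList l) (fun x => x) false) ↔ l.Pairwise (· < ·) := by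
  constructor
  · intro h; rw [h]; exact PySem.List.sorted_ofList_pairwise_lt (xs := l)
  · intro hp
    have hnd : l.Nodup := hp.nodup
    have hof : PySem.Set.ofList l = l := by
      rw [PySem.Set.ofList_eq_foldl]
      simpa using foldl_add_nodup l [] (by simpa using hnd)
    rw [hof]
    exact (PySem.List.sorted_eq_of_perm_of_pairwise_lt l l (fun x => x) (List.Perm.refl l) hp).symm

-- ===== VERDICT (by name: the statement is the Claim_ definition above) =====
theorem choose_measure_numbers_py_spec : Claim_equal_choose_measure_numbers_py := by
  intro xs _
  unfold Spec_choose_measure_numbers_py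
  unfold choose_measure_numbers_py choose_measure_numbers_py_alt
  rw [chooseA_go_eq]
  cases hm : xs.mapM pvParse with
  | none => simp
  | some l =>
    simp only [Option.bind_some]
    have hiff : chainB (-1) l = true ↔
        (decide (l = PySem.List.sorted (PySem.Set.ofList l) (fun x => x) false) &&
          (l.isEmpty || decide (0 < l.headD 0))) = true := by
      rw [chainB_neg1, ← sorted_ofList_eq_iff]
      simp only [Bool.and_eq_true, Bool.or_eq_true, decide_eq_true_eq, List.isEmpty_iff]
    by_cases hc : chainB (-1) l = true
    · rw [if_pos hc, if_pos (hiff.mp hc)]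
    · rw [if_neg (by simp [Bool.eq_false_iff.mpr hc]),
        if_neg (by intro h; exact hc (hiff.mpr h))]
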